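-- pv_equiv track=rewrite | github.com/Linux-Server/ML-Task | ml_assessment.py | flexible_anagram
-- ===== SOURCE A (Python) =====
-- from collections import Counter
--
-- def flexible_anagram(str1: str, str2: str) -> str:
--     """
--     Check if two strings are flexible anagrams.
--
--     Flexible anagrams are defined as:
--     - Same length: can differ by at most one character
--     - Length differs by 1: shorter string's characters must all be in longer string
--     - Length differs by more than 1: not flexible anagrams
--
--     Args:
--         str1 (str): First string
--         str2 (str): Second string
--
--     Returns:
--         str: 'YES' if they are flexible anagrams, 'NO' otherwise
--     """
--     # Convert to lowercase for case-insensitive comparison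
--     s1 = str1.lower()
--     s2 = str2.lower()
--
--     len_diff = abs(len(s1) - len(s2))
--
--     # If lengths differ by more than 1, they cannot be flexible anagrams
--     if len_diff > 1:
--         return 'NO'
--
--     # Count characters in both strings
--     count1 = Counter(s1)
--     count2 = Counter(s2)
--
--     if len_diff == 0:
--         # Same length: can differ by at most one character
--         # Calculate total character differences
--         diff = 0
--         all_chars = set(count1.keys()) | set(count2.keys())
--         for char in all_chars:
--             diff += abs(count1.get(char, 0) - count2.get(char, 0))
--
--         # If they differ by at most 2 (one char removed, one char added = 2 differences)
--         # This accounts for one mismatch (e.g., 'abcd' vs 'abce')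
--         if diff <= 2:
--             return 'YES'
--         else:
--             return 'NO'
--
--     else:
--         # Length differs by 1
--         # The shorter string's characters must all match with longer string
--         # (with at most the extra character as difference)
--         if len(s1) > len(s2):
--             longer, shorter = count1, count2
--         else:
--             longer, shorter = count2, count1
--
--         # Check if shorter is subset of longer (character-wise)
--         diff = 0
--         for char, cnt in shorter.items():
--             if longer.get(char, 0) < cnt:
--                 diff += cnt - longer.get(char, 0)
--
--         # At most 0 missing characters from shorter in longer
--         if diff == 0:
--             return 'YES'
--         else:
--             return 'NO'
-- ===== SOURCE B (Python) =====
-- def flexible_anagram(str1: str, str2: str) -> str: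
--     s1 = sorted(str1.lower())
--     s2 = sorted(str2.lower())
--     if abs(len(s1) - len(s2)) > 1:
--         return 'NO'
--     # two-pointer merge over the sorted character lists: count the multiset
--     # symmetric difference
--     i = j = 0
--     diff = 0
--     while i < len(s1) and j < len(s2):
--         if s1[i] == s2[j]:
--             i += 1
--             j += 1
--         elif s1[i] < s2[j]:
--             diff += 1
--             i += 1
--         else:
--             diff += 1
--             j += 1
--     diff += (len(s1) - i) + (len(s2) - j)
--     return 'YES' if diff <= 2 else 'NO'
-- ===== Notes on version B (the rewrite author's own statement) =====
-- stated objective: simpler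
-- what changed: Replaced the two Counter-based branches (sum of absolute count differences over the key-set union for equal lengths; a subset check over the shorter Counter's items for lengths differing by 1) with sorting both lowercased strings and a single two-pointer merge that counts the multiset symmetric difference, returning YES iff it is at most 2 in all cases.
import Mathlib
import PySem

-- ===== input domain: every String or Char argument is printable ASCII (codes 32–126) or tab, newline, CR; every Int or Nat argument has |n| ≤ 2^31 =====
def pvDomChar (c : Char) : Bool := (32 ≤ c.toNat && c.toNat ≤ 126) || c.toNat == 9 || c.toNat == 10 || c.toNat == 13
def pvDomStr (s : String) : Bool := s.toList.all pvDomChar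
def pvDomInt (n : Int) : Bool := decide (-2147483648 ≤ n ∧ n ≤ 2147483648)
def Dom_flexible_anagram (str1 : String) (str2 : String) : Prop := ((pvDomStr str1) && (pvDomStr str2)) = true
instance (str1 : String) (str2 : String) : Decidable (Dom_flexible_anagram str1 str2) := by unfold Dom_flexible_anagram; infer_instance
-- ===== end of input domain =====

-- B replaces A's two Counter-based branches by sorting both lowercased strings and counting the
-- multiset symmetric difference with a two-pointer merge ('YES' iff it is ≤ 2); objective: simpler.

-- ===== PORT A =====
def flexible_anagram (str1 : String) (str2 : String) : String :=
  let s1 := (PySem.Str.lower str1).toList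
  let s2 := (PySem.Str.lower str2).toList
  let len_diff : Int := |(s1.length : Int) - (s2.length : Int)|
  if 1 < len_diff then "NO"
  else
    let count1 := PySem.Dict.counter s1
    let count2 := PySem.Dict.counter s2
    if len_diff = 0 then
      let all_chars := (PySem.Set.ofList count1.keys).union (PySem.Set.ofList count2.keys)
      let diff := all_chars.foldl (fun d c => d + |count1.getD c 0 - count2.getD c 0|) (0 : Int)
      if diff ≤ 2 then "YES" else "NO"
    else
      let lp := if s2.length < s1.length then (count1, count2) else (count2, count1)
      let longer := lp.1
      let shorter := lp.2
      let diff := shorter.items.foldl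
        (fun d p => if longer.getD p.1 0 < p.2 then d + (p.2 - longer.getD p.1 0) else d) (0 : Int)
      if diff = 0 then "YES" else "NO"

-- ===== PORT B =====
-- two-pointer merge of two sorted char lists: the size of the multiset symmetric difference
def pvMergeDiff : List Char → List Char → Nat
  | [], ys => ys.length
  | x :: xs, [] => (x :: xs).length
  | x :: xs, y :: ys =>
    if x = y then pvMergeDiff xs ys
    else if x < y then 1 + pvMergeDiff xs (y :: ys)
    else 1 + pvMergeDiff (x :: xs) ys

def flexible_anagram_alt (str1 : String) (str2 : String) : String :=
  let s1 := PySem.List.sorted (PySem.Str.lower str1).toList id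
  let s2 := PySem.List.sorted (PySem.Str.lower str2).toList id
  if 1 < |(s1.length : Int) - (s2.length : Int)| then "NO"
  else if pvMergeDiff s1 s2 ≤ 2 then "YES" else "NO"

-- ===== PRECONDITION & SPEC =====
def Spec_flexible_anagram (str1 : String) (str2 : String) (out : String) : Prop := out = flexible_anagram_alt str1 str2
instance (str1 : String) (str2 : String) (out : String) : Decidable (Spec_flexible_anagram str1 str2 out) := by unfold Spec_flexible_anagram; infer_instance

-- ===== CLAIM (what is proved, stated in full; the proofs are below) =====
def Claim_equal_flexible_anagram : Prop := ∀ (str1 : String) (str2 : String), Dom_flexible_anagram str1 str2 → Spec_flexible_anagram str1 str2 (flexible_anagram str1 str2)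

-- ===== LEMMAS AND PROOFS =====

theorem pv_cons_sub_cons (x : Char) (s t : Multiset Char) :
    (x ::ₘ s) - (x ::ₘ t) = s - t := by
  ext c
  simp [Multiset.count_sub]

theorem pv_cons_sub_of_count_zero (x : Char) (s t : Multiset Char) (h : t.count x = 0) :
    (x ::ₘ s) - t = x ::ₘ (s - t) := by
  ext c
  by_cases hc : c = x <;> simp [Multiset.count_sub, hc, h]

theorem pv_sub_cons_of_count_zero (x : Char) (s t : Multiset Char) (h : t.count x = 0) :
    t - (x ::ₘ s) = t - s := by
  ext c
  by_cases hc : c = x <;> simp [Multiset.count_sub, hc, h]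

-- the merge computes the symmetric-difference size of the two multisets
theorem pvMergeDiff_eq (l1 l2 : List Char)
    (h1 : l1.Pairwise (· ≤ ·)) (h2 : l2.Pairwise (· ≤ ·)) :
    pvMergeDiff l1 l2 =
      ((l1 : Multiset Char) - (l2 : Multiset Char)).card +
      ((l2 : Multiset Char) - (l1 : Multiset Char)).card := by
  fun_induction pvMergeDiff l1 l2 with
  | case1 ys => simp
  | case2 x xs => simp
  | case3 xs x ys ih =>
      rw [← Multiset.cons_coe, ← Multiset.cons_coe, pv_cons_sub_cons, pv_cons_sub_cons]
      exact ih (List.pairwise_cons.mp h1).2 (List.pairwise_cons.mp h2).2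
  | case4 x xs y ys hne hlt ih =>
      have hx : x ∉ (y :: ys) := by
        intro hm
        rcases List.mem_cons.mp hm with h | h
        · exact hne h
        · exact absurd hlt (not_lt.mpr ((List.pairwise_cons.mp h2).1 x h))
      have hc : ((y :: ys : List Char) : Multiset Char).count x = 0 :=
        Multiset.count_eq_zero.mpr (by simpa using hx)
      rw [← Multiset.cons_coe, pv_cons_sub_of_count_zero x _ _ hc,
        pv_sub_cons_of_count_zero x _ _ hc, Multiset.card_cons]
      rw [ih (List.pairwise_cons.mp h1).2 h2]
      omega
  | case5 x xs y ys hne hnlt ih =>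
      have hylt : y < x := lt_of_le_of_ne (not_lt.mp hnlt) (fun h => hne h.symm)
      have hy : y ∉ (x :: xs) := by
        intro hm
        rcases List.mem_cons.mp hm with h | h
        · exact hne h.symm
        · exact absurd hylt (not_lt.mpr ((List.pairwise_cons.mp h1).1 y h))
      have hc : ((x :: xs : List Char) : Multiset Char).count y = 0 :=
        Multiset.count_eq_zero.mpr (by simpa using hy)
      rw [← Multiset.cons_coe (a := y), pv_cons_sub_of_count_zero y _ _ hc,
        pv_sub_cons_of_count_zero y _ _ hc, Multiset.card_cons]
      rw [ih h1 (List.pairwise_cons.mp h2).2]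
      omega

theorem pv_finset_sum_counts (t : Finset Char) (m : Multiset Char)
    (hs : ∀ c, m.count c ≠ 0 → c ∈ t) :
    ∑ c ∈ t, (m.count c : Int) = m.card := by
  have h : ∑ c ∈ t, m.count c = m.card := by
    rw [← Multiset.toFinset_sum_count_eq m]
    exact (Finset.sum_subset
      (fun c hc => hs c (by simpa [Multiset.count_eq_zero] using Multiset.mem_toFinset.mp hc))
      (fun c _ hc => by
        have : c ∉ m := fun h => hc (Multiset.mem_toFinset.mpr h)
        simpa [Multiset.count_eq_zero] using this)).symm
  exact_mod_cast congrArg (Nat.cast : Nat → Int) h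

theorem pv_sum_counts (U : List Char) (hU : U.Nodup) (m : Multiset Char)
    (hs : ∀ c, m.count c ≠ 0 → c ∈ U) :
    (U.map (fun c => (m.count c : Int))).sum = m.card := by
  rw [← List.sum_toFinset _ hU]
  exact pv_finset_sum_counts U.toFinset m (fun c hc => List.mem_toFinset.mpr (hs c hc))

theorem pv_sum_absdiff (U : List Char) (hU : U.Nodup) (l1 l2 : List Char)
    (hs : ∀ c, c ∈ l1 ∨ c ∈ l2 → c ∈ U) :
    (U.map (fun c => |(l1.count c : Int) - (l2.count c : Int)|)).sum
      = (((l1 : Multiset Char) - (l2 : Multiset Char)).card : Int)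
        + (((l2 : Multiset Char) - (l1 : Multiset Char)).card : Int) := by
  have hpt : ∀ c : Char, |(l1.count c : Int) - (l2.count c : Int)|
      = (((l1 : Multiset Char) - l2).count c : Int) + (((l2 : Multiset Char) - l1).count c : Int) := by
    intro c
    simp only [Multiset.count_sub, Multiset.coe_count]
    rcases le_total ((l2.count c : Int)) ((l1.count c : Int)) with h | h
    · rw [abs_of_nonneg (by omega)]; omega
    · rw [abs_of_nonpos (by omega)]; omega
  rw [show (U.map (fun c => |(l1.count c : Int) - (l2.count c : Int)|))
      = U.map (fun c => (((l1 : Multiset Char) - l2).count c : Int)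
          + (((l2 : Multiset Char) - l1).count c : Int)) from List.map_congr_left (fun c _ => hpt c)]
  rw [← List.sum_toFinset _ hU, Finset.sum_add_distrib]
  rw [pv_finset_sum_counts _ _ (fun c hc => List.mem_toFinset.mpr (hs c (Or.inl (by
        have : ((l1 : Multiset Char)).count c ≠ 0 := by
          simp only [Multiset.count_sub] at hc; omega
        simpa [Multiset.coe_count, List.count_eq_zero] using this))))]
  rw [pv_finset_sum_counts _ _ (fun c hc => List.mem_toFinset.mpr (hs c (Or.inr (by
        have : ((l2 : Multiset Char)).count c ≠ 0 := by
          simp only [Multiset.count_sub] at hc; omega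
        simpa [Multiset.coe_count, List.count_eq_zero] using this))))]

theorem pv_main (str1 str2 : String) :
    flexible_anagram str1 str2 = flexible_anagram_alt str1 str2 := by
  unfold flexible_anagram flexible_anagram_alt
  have hp1 := PySem.List.sorted_perm (PySem.Str.lower str1).toList id false
  have hp2 := PySem.List.sorted_perm (PySem.Str.lower str2).toList id false
  set l1 := (PySem.Str.lower str1).toList with hl1
  set l2 := (PySem.Str.lower str2).toList with hl2
  set s1 := PySem.List.sorted l1 id with hs1
  set s2 := PySem.List.sorted l2 id with hs2
  have hL1 : s1.length = l1.length := hp1.length_eq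
  have hL2 : s2.length = l2.length := hp2.length_eq
  have hm1 : (s1 : Multiset Char) = (l1 : Multiset Char) := Multiset.coe_eq_coe.mpr hp1
  have hm2 : (s2 : Multiset Char) = (l2 : Multiset Char) := Multiset.coe_eq_coe.mpr hp2
  have hD : pvMergeDiff s1 s2 =
      ((l1 : Multiset Char) - (l2 : Multiset Char)).card +
      ((l2 : Multiset Char) - (l1 : Multiset Char)).card := by
    rw [← hm1, ← hm2]
    exact pvMergeDiff_eq s1 s2 (PySem.List.sorted_pairwise l1 id) (PySem.List.sorted_pairwise l2 id)
  have hc1 : ((l1 : Multiset Char) - l2).card + ((l1 : Multiset Char) ∩ l2).card = l1.length := by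
    rw [← Multiset.card_add, Multiset.sub_add_inter, Multiset.coe_card]
  have hc2 : ((l2 : Multiset Char) - l1).card + ((l2 : Multiset Char) ∩ l1).card = l2.length := by
    rw [← Multiset.card_add, Multiset.sub_add_inter, Multiset.coe_card]
  have hci : ((l1 : Multiset Char) ∩ l2).card = ((l2 : Multiset Char) ∩ l1).card := by
    rw [Multiset.inter_comm]
  simp only [hL1, hL2, hD]
  by_cases hgap : 1 < |(l1.length : Int) - (l2.length : Int)|
  · rw [if_pos hgap, if_pos hgap]
  · rw [if_neg hgap, if_neg hgap]
    by_cases h0 : |(l1.length : Int) - (l2.length : Int)| = 0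
    · rw [if_pos h0]
      -- equal lengths: A's loop over the union of the Counter key sets
      have hU : ∀ c : Char, c ∈ l1 ∨ c ∈ l2 →
          c ∈ (PySem.Set.ofList (PySem.Dict.counter l1).keys).union
              (PySem.Set.ofList (PySem.Dict.counter l2).keys) := by
        intro c hc
        rw [PySem.Set.mem_union]
        rcases hc with h | h
        · exact Or.inl (by rw [PySem.Dict.keys_counter, PySem.Set.mem_ofList,
            PySem.Set.mem_ofList]; exact h)
        · exact Or.inr (by rw [PySem.Dict.keys_counter, PySem.Set.mem_ofList,
            PySem.Set.mem_ofList]; exact h)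
      have hnd : List.Nodup ((PySem.Set.ofList (PySem.Dict.counter l1).keys).union
          (PySem.Set.ofList (PySem.Dict.counter l2).keys)) :=
        PySem.Set.nodup_union _ _ (PySem.Set.nodup_ofList _)
      have hfold : ((PySem.Set.ofList (PySem.Dict.counter l1).keys).union
            (PySem.Set.ofList (PySem.Dict.counter l2).keys)).foldl
            (fun d c => d + |(PySem.Dict.counter l1).getD c 0 - (PySem.Dict.counter l2).getD c 0|)
            (0 : Int)
          = (((l1 : Multiset Char) - (l2 : Multiset Char)).card : Int)
            + (((l2 : Multiset Char) - (l1 : Multiset Char)).card : Int) := by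
        rw [PySem.List.foldl_add]
        simp only [PySem.Dict.getD_counter]
        rw [pv_sum_absdiff _ hnd l1 l2 hU]
        ring
      rw [hfold]
      by_cases hle : ((l1 : Multiset Char) - l2).card + ((l2 : Multiset Char) - l1).card ≤ 2
      · rw [if_pos (by exact_mod_cast hle), if_pos hle]
      · rw [if_neg (by exact_mod_cast hle), if_neg hle]
    · rw [if_neg h0]
      -- lengths differ by exactly 1: A checks that the shorter Counter is a sub-multiset
      have habs : l2.length < l1.length ∧ l1.length = l2.length + 1 ∨
          l1.length < l2.length ∧ l2.length = l1.length + 1 := by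
        rcases le_total ((l2.length : Int)) ((l1.length : Int)) with h | h
        · rw [abs_of_nonneg (by omega)] at hgap h0; omega
        · rw [abs_of_nonpos (by omega)] at hgap h0; omega
      have hshort : ∀ (xs ys : List Char),
          (PySem.Dict.counter xs).items.foldl
            (fun d p => if (PySem.Dict.counter ys).getD p.1 0 < p.2
              then d + (p.2 - (PySem.Dict.counter ys).getD p.1 0) else d) (0 : Int)
          = (((xs : Multiset Char) - (ys : Multiset Char)).card : Int) := by
        intro xs ys
        rw [PySem.Dict.items_counter, List.foldl_map]
        have hfun : (fun (d : Int) (k : Char) =>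
            if (PySem.Dict.counter ys).getD k 0 < ((xs.count k : Int))
              then d + (((xs.count k : Int)) - (PySem.Dict.counter ys).getD k 0) else d)
            = fun d k => d + (((xs : Multiset Char) - (ys : Multiset Char)).count k : Int) := by
          funext d k
          rw [PySem.Dict.getD_counter]
          simp only [Multiset.count_sub, Multiset.coe_count]
          split_ifs with h <;> omega
        rw [hfun, PySem.List.foldl_add]
        rw [pv_sum_counts _ (PySem.Set.nodup_ofList _) _ (fun c hc => by
          rw [PySem.Set.mem_ofList]
          have : ((xs : Multiset Char)).count c ≠ 0 := by
            simp only [Multiset.count_sub] at hc; omega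
          simpa [Multiset.coe_count, List.count_eq_zero] using this)]
        ring
      rcases habs with ⟨hlt, heq1⟩ | ⟨hlt, heq1⟩
      · rw [if_pos hlt]
        simp only []
        rw [hshort l2 l1]
        by_cases hz : ((l2 : Multiset Char) - l1).card = 0
        · rw [if_pos (by exact_mod_cast hz), if_pos (by omega)]
        · rw [if_neg (by exact_mod_cast hz), if_neg (by omega)]
      · rw [if_neg (show ¬ l2.length < l1.length by omega)]
        simp only []
        rw [hshort l1 l2]
        by_cases hz : ((l1 : Multiset Char) - l2).card = 0
        · rw [if_pos (by exact_mod_cast hz), if_pos (by omega)]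
        · rw [if_neg (by exact_mod_cast hz), if_neg (by omega)]

-- ===== VERDICT (by name: the statement is the Claim_ definition above) =====
theorem flexible_anagram_spec : Claim_equal_flexible_anagram := by
  intro str1 str2 _
  unfold Spec_flexible_anagram
  exact pv_main str1 str2
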